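-- pv_equiv track=rewrite | github.com/funsim/fenicsbot | tests/test_fenicsbot.py | rebatch
-- ===== SOURCE A (Python) =====
-- def rebatch(l, l_sizes):
--     """
--     Helper method for running a test several times
--     with different batch sizes.
--
--     Resizes a plain list into a list of lists with the
--     same elements, but with lengths given in l_sizes.
--
--     Example:
--     l = [1, 2, 3, 4, 5] becomes:
--       --[[1, 2], [3, 4], [5]] with l_sizes = [2, 2, 1]
--       --[[1, 2, 3, 4], [5]] with l_sizes = [4, 1]
--       --[[1], [2], [3], [4], [5]] with l_sizes = [1, 1, 1, 1, 1]
--       --[1, 2, 3, 4, 5] with l_sizes = [5]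
--     """
--     if len(l) != sum(l_sizes):
--         raise Exception("User counting error")
--
--     i = 0
--     return_list = [[] for batch_size in l_sizes]
--     for j in range(len(l_sizes)):
--         batch_size = l_sizes[j]
--         for _ in range(batch_size):
--             return_list[j].append(l[i])
--             i += 1
--     return return_list
-- ===== SOURCE B (Python) =====
-- def rebatch(l, l_sizes):
--     if len(l) != sum(l_sizes):
--         raise Exception("User counting error")
--     out = []
--     start = 0
--     for size in l_sizes:
--         out.append(l[start:start+size])
--         start += size
--     return out
-- ===== Notes on version B (the rewrite author's own statement) =====
-- stated objective: simpler
-- what changed: Replaces A's pre-allocated list of empty sublists filled by a nested element-by-element append loop with a running offset that emits each chunk as one slice l[start:start+size].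
import Mathlib
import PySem

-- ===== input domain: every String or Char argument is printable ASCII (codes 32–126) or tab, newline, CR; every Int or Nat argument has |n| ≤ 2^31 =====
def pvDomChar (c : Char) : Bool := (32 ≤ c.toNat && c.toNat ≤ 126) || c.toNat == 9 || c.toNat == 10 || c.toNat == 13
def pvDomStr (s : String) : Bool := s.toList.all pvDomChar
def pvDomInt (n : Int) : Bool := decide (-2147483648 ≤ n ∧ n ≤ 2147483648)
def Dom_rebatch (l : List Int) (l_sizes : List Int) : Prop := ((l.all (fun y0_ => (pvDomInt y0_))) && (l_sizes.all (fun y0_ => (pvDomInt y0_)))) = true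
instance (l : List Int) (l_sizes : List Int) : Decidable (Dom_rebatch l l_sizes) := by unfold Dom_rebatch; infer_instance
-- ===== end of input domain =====

-- B replaces A's nested element-append loop over pre-allocated empty sublists by a running offset emitting each chunk as one slice (simpler decomposition, same cost).


-- ===== PORT A =====
-- inner loop 'for _ in range(batch_size): return_list[j].append(l[i]); i += 1' (pyGetD's default is never hit inside Pre_)
def rebatchA_chunk (l : List Int) (s : Int) (i : Int) : List Int × Int :=
  (PySem.List.pyRange 0 s 1).foldl (fun p _ => (p.1 ++ [PySem.List.pyGetD l p.2 0], p.2 + 1)) ([], i)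

-- outer loop 'for j in range(len(l_sizes))', carrying the running index i
def rebatchA_go (l : List Int) (sizes : List Int) (i : Int) : List (List Int) :=
  match sizes with
  | [] => []
  | s :: rest =>
    let p := rebatchA_chunk l s i
    p.1 :: rebatchA_go l rest p.2

def rebatch (l : List Int) (l_sizes : List Int) : List (List Int) :=
  if (l.length : Int) ≠ l_sizes.sum then [] else rebatchA_go l l_sizes 0

-- ===== PORT B =====
def rebatchB_go (l : List Int) (start : Int) (sizes : List Int) : List (List Int) :=
  match sizes with
  | [] => []
  | s :: rest => PySem.List.slice l (some start) (some (start + s)) :: rebatchB_go l (start + s) rest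

def rebatch_alt (l : List Int) (l_sizes : List Int) : List (List Int) :=
  if (l.length : Int) ≠ l_sizes.sum then [] else rebatchB_go l 0 l_sizes

-- ===== PRECONDITION & SPEC =====
-- A raises Exception when len(l) ≠ sum(l_sizes), and raises IndexError whenever some size is
-- negative (then the positive sizes overrun l); Pre_ excludes exactly those raising inputs.
def Pre_rebatch (l : List Int) (l_sizes : List Int) : Prop :=
  (l.length : Int) = l_sizes.sum ∧ ∀ s ∈ l_sizes, 0 ≤ s
instance (l : List Int) (l_sizes : List Int) : Decidable (Pre_rebatch l l_sizes) := by unfold Pre_rebatch; infer_instance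
def pvWitness_rebatch : List Int × List Int := ([1, 2, 3, 4, 5], [2, 2, 1])

def Spec_rebatch (l : List Int) (l_sizes : List Int) (out : List (List Int)) : Prop := out = rebatch_alt l l_sizes
instance (l : List Int) (l_sizes : List Int) (out : List (List Int)) : Decidable (Spec_rebatch l l_sizes out) := by unfold Spec_rebatch; infer_instance

-- ===== CLAIM (what is proved, stated in full; the proofs are below) =====
def Claim_equal_rebatch : Prop := ∀ (l : List Int) (l_sizes : List Int), Dom_rebatch l l_sizes → Pre_rebatch l l_sizes → Spec_rebatch l l_sizes (rebatch l l_sizes)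

-- ===== LEMMAS AND PROOFS =====

-- A's inner loop of n appends from position k is one take of n elements at offset k
lemma chunk_eq (l : List Int) (n k : Nat) (h : k + n ≤ l.length) :
    rebatchA_chunk l (n : Int) (k : Int) = ((l.drop k).take n, ((k + n : Nat) : Int)) := by
  induction n with
  | zero => simp [rebatchA_chunk]
  | succ n ih =>
    have h' : k + n ≤ l.length := by omega
    have hlt : k + n < l.length := by omega
    unfold rebatchA_chunk at ih ⊢
    rw [show ((n + 1 : Nat) : Int) = (n : Int) + 1 by push_cast; ring,
        PySem.List.pyRange_one_succ_right (by positivity), List.foldl_append, ih h']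
    simp only [List.foldl_cons, List.foldl_nil]
    rw [Prod.mk.injEq]
    refine ⟨?_, by push_cast; ring⟩
    · rw [show PySem.List.pyGetD l ((k + n : Nat) : Int) 0 = l.getD (k + n) 0 from
          PySem.List.pyGetD_natCast l (k + n) 0]
      rw [List.getD_eq_getElem l 0 hlt, List.take_add_one]
      congr 1
      have hn : n < (l.drop k).length := by simp; omega
      simp [List.getElem?_eq_getElem hn, List.getElem_drop]

-- the two loops agree while the running index stays within l
lemma go_eq (l : List Int) : ∀ (sizes : List Int) (k : Nat),
    (∀ s ∈ sizes, 0 ≤ s) → (k : Int) + sizes.sum ≤ (l.length : Int) →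
    rebatchA_go l sizes (k : Int) = rebatchB_go l (k : Int) sizes := by
  intro sizes
  induction sizes with
  | nil => intro k _ _; rfl
  | cons s rest ih =>
    intro k hnn hle
    have hs : 0 ≤ s := hnn s (by simp)
    have hrest : 0 ≤ rest.sum := List.sum_nonneg (fun x hx => hnn x (by simp [hx]))
    obtain ⟨n, rfl⟩ : ∃ n : Nat, s = (n : Int) := ⟨s.toNat, (Int.toNat_of_nonneg hs).symm⟩
    have hbound : k + n ≤ l.length := by
      have := List.sum_cons (a := (n : Int)) (l := rest)
      omega
    have hslice : PySem.List.slice l (some (k : Int)) (some ((k : Int) + (n : Int))) =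
        (l.drop k).take n := PySem.List.slice_natCast_add l k n
    rw [rebatchA_go, rebatchB_go, chunk_eq l n k hbound, hslice]
    refine congrArg _ ?_
    rw [show ((k + n : Nat) : Int) = (k : Int) + (n : Int) by push_cast; ring]
    exact ih (k + n) (fun x hx => hnn x (by simp [hx]))
      (by push_cast; have := List.sum_cons (a := (n : Int)) (l := rest); omega)

-- ===== VERDICT (by name: the statement is the Claim_ definition above) =====
theorem rebatch_spec : Claim_equal_rebatch := by
  intro l l_sizes _ hpre
  obtain ⟨hsum, hnn⟩ := hpre
  unfold Spec_rebatch rebatch rebatch_alt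
  rw [if_neg (by omega), if_neg (by omega)]
  have := go_eq l l_sizes 0 hnn (by simp; omega)
  simpa using this
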